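-- pv_equiv track=rewrite | github.com/Dm7add96412/deliveryfee | woltbackend/backend/routes/api.py | calc_items
-- ===== SOURCE A (Python) =====
-- def calc_items(items: int):
--     i = 5
--     fee = 0
--     if items < i:
--         return 0
--     if items > 12:
--         fee = 120
--     while i < items:
--         i += 1
--         fee += 50
--     fee += 50
--     return fee
-- ===== SOURCE B (Python) =====
-- def calc_items(items: int):
--     if items < 5:
--         return 0
--     return 50 * (items - 4) + (120 if items > 12 else 0)
-- ===== Notes on version B (the rewrite author's own statement) =====
-- stated objective: faster
-- what changed: Replaced the per-item counting while-loop with a closed-form arithmetic formula (base fee times items above the free threshold, plus the bulk surcharge).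
import Mathlib
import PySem

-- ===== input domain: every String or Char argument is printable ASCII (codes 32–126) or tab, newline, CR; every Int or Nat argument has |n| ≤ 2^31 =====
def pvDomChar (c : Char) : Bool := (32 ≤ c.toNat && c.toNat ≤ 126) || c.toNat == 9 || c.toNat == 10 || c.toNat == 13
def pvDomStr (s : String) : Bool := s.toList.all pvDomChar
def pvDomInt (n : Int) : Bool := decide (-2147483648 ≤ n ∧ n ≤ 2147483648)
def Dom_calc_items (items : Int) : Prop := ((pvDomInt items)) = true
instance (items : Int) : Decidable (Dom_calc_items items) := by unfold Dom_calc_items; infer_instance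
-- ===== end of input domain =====

-- B replaces A's counting while-loop with a closed-form formula (objective: faster).

-- ===== PORT A =====
-- the 'while i < items: i += 1; fee += 50' loop, fuel = (items - i).toNat
def calcItemsLoop : Nat → Int → Int → Int
  | 0, _, fee => fee
  | Nat.succ n, i, fee => calcItemsLoop n (i + 1) (fee + 50)

def calc_items (items : Int) : Int :=
  let i : Int := 5
  let fee : Int := 0
  if items < i then 0
  else
    let fee := if items > 12 then (120 : Int) else fee
    let fee := calcItemsLoop (items - i).toNat i fee
    fee + 50

-- ===== PORT B =====
def calc_items_alt (items : Int) : Int :=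
  if items < 5 then 0
  else 50 * (items - 4) + (if items > 12 then 120 else 0)

-- ===== PRECONDITION & SPEC =====
def Spec_calc_items (items : Int) (out : Int) : Prop := out = calc_items_alt items
instance (items : Int) (out : Int) : Decidable (Spec_calc_items items out) := by unfold Spec_calc_items; infer_instance

-- ===== CLAIM (what is proved, stated in full; the proofs are below) =====
def Claim_equal_calc_items : Prop := ∀ (items : Int), Dom_calc_items items → Spec_calc_items items (calc_items items)

-- ===== LEMMAS AND PROOFS =====
theorem calcItemsLoop_eq (n : Nat) (i fee : Int) :
    calcItemsLoop n i fee = fee + 50 * n := by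
  induction n generalizing i fee with
  | zero => simp [calcItemsLoop]
  | succ n ih => simp [calcItemsLoop, ih]; ring

-- ===== VERDICT (by name: the statement is the Claim_ definition above) =====
theorem calc_items_spec : Claim_equal_calc_items := by
  intro items _
  unfold Spec_calc_items calc_items calc_items_alt
  by_cases h : items < 5
  · simp [h]
  · have h5 : (5:Int) ≤ items := le_of_not_gt h
    simp only [h]
    rw [calcItemsLoop_eq]
    have : ((items - 5).toNat : Int) = items - 5 := Int.toNat_of_nonneg (by omega)
    rw [this]
    split_ifs <;> ring
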